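-- pv_equiv track=rewrite | github.com/tenacious210/dgg-services | dgg_services_manager.py | convert_to_ansi
-- ===== SOURCE A (Python) =====
-- def convert_to_ansi(message: str):
--     """takes in a whole Discord message, converts it to ansi, and color codes it"""
--     # credit to: https://gist.github.com/kkrypt0nn/a02506f3712ff2d1c8ca7c9e0aed7c06
--     log_level_colors = {
--         "CRITICAL": 31,
--         "ERROR": 31,
--         "WARNING": 33,
--         "INFO": 34,
--         "DEBUG": 37,
--     }
--     container_colors = {
--         "dgg-services-manager": 31,
--         "dgg-relay": 33,
--         "dggpt": 34,
--         "dgg-emotes-bot": 35,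
--         "dgg-logger": 36,
--     }
--     message = f"```ansi\n{message}\n```"
--     for level in log_level_colors:
--         formatted = f"\u001b[1;{log_level_colors[level]}m{level}\u001b[0;0m"
--         message = message.replace(level, formatted)
--     for container in container_colors:
--         formatted = f"\u001b[1;{container_colors[container]}m{container}\u001b[0;0m"
--         message = message.replace(container, formatted)
--     return message
-- ===== SOURCE B (Python) =====
-- def convert_to_ansi(message: str):
--     """takes in a whole Discord message, converts it to ansi, and color codes it"""
--     colors = {
--         "CRITICAL": 31,
--         "ERROR": 31,
--         "WARNING": 33,
--         "INFO": 34,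
--         "DEBUG": 37,
--         "dgg-services-manager": 31,
--         "dgg-relay": 33,
--         "dggpt": 34,
--         "dgg-emotes-bot": 35,
--         "dgg-logger": 36,
--     }
--     text = f"```ansi\n{message}\n```"
--     out = []
--     i = 0
--     n = len(text)
--     while i < n:
--         for key, color in colors.items():
--             if text.startswith(key, i):
--                 out.append(f"\u001b[1;{color}m{key}\u001b[0;0m")
--                 i += len(key)
--                 break
--         else:
--             out.append(text[i])
--             i += 1
--     return "".join(out)
-- ===== Notes on version B (the rewrite author's own statement) =====
-- stated objective: alternative
-- what changed: A makes ten sequential full-string str.replace passes, one per color keyword; B merges both color dicts into one table and does a single left-to-right scan of the wrapped message, emitting the ANSI-wrapped chunk for the first table key matching at each position.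
import Mathlib
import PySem

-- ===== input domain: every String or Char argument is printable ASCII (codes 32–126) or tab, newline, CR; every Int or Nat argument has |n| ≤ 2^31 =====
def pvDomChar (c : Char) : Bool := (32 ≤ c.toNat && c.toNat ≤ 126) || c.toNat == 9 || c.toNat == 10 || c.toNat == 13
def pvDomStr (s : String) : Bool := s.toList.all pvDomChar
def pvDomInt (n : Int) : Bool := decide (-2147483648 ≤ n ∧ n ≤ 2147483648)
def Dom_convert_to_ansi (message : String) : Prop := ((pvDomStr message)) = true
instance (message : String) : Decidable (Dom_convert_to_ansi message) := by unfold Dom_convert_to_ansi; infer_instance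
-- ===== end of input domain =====

-- B replaces A's ten sequential full-string str.replace passes by one merged color table
-- and a single left-to-right scan (objective: alternative; same return value everywhere).

-- ===== PORT A =====
def convert_to_ansi (message : String) : String :=
  let log_level_colors : List (String × Int) :=
    [("CRITICAL", 31), ("ERROR", 31), ("WARNING", 33), ("INFO", 34), ("DEBUG", 37)]
  let container_colors : List (String × Int) :=
    [("dgg-services-manager", 31), ("dgg-relay", 33), ("dggpt", 34),
     ("dgg-emotes-bot", 35), ("dgg-logger", 36)]
  let m0 := "```ansi\n" ++ message ++ "\n```"
  let m1 := log_level_colors.foldl (fun msg kv =>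
    let formatted := "\u001b[1;" ++ PySem.Int.toStr kv.2 ++ "m" ++ kv.1 ++ "\u001b[0;0m"
    PySem.Str.replace msg kv.1 formatted) m0
  container_colors.foldl (fun msg kv =>
    let formatted := "\u001b[1;" ++ PySem.Int.toStr kv.2 ++ "m" ++ kv.1 ++ "\u001b[0;0m"
    PySem.Str.replace msg kv.1 formatted) m1

-- ===== PORT B =====
-- the merged color table of Source B, keys as char lists
def pvColors : List (List Char × Int) :=
  [("CRITICAL".toList, 31), ("ERROR".toList, 31), ("WARNING".toList, 33),
   ("INFO".toList, 34), ("DEBUG".toList, 37),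
   ("dgg-services-manager".toList, 31), ("dgg-relay".toList, 33), ("dggpt".toList, 34),
   ("dgg-emotes-bot".toList, 35), ("dgg-logger".toList, 36)]

-- the chunk Source B appends for a matched key: f"\u001b[1;{color}m{key}\u001b[0;0m"
def pvFmt (color : Int) (key : List Char) : List Char :=
  ['\u001b', '[', '1', ';'] ++ PySem.Int.toChars color ++ ['m'] ++ key ++
    ['\u001b', '[', '0', ';', '0', 'm']

-- Source B's single left-to-right scan: at each position the first table key that is a
-- prefix is wrapped and skipped, otherwise the character is copied
def pvScan (table : List (List Char × Int)) : List Char → List Char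
  | [] => []
  | c :: t =>
    match table.find? (fun kv => kv.1.isPrefixOf (c :: t)) with
    | some kv => pvFmt kv.2 kv.1 ++ pvScan table (t.drop (kv.1.length - 1))
    | none => c :: pvScan table t
termination_by s => s.length
decreasing_by
  · simp only [List.length_cons, List.length_drop]
    omega
  · simp

def convert_to_ansi_alt (message : String) : String :=
  String.ofList (pvScan pvColors ("```ansi\n".toList ++ message.toList ++ "\n```".toList))

-- ===== PRECONDITION & SPEC =====
def Spec_convert_to_ansi (message : String) (out : String) : Prop := out = convert_to_ansi_alt message
instance (message : String) (out : String) : Decidable (Spec_convert_to_ansi message out) := by unfold Spec_convert_to_ansi; infer_instance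

-- ===== CLAIM (what is proved, stated in full; the proofs are below) =====
def Claim_equal_convert_to_ansi : Prop := ∀ (message : String), Dom_convert_to_ansi message → Spec_convert_to_ansi message (convert_to_ansi message)

-- ===== LEMMAS AND PROOFS =====

-- structural form of Python's str.replace for a nonempty pattern
def repl (old new : List Char) : List Char → List Char
  | [] => []
  | c :: t =>
    if old.isPrefixOf (c :: t) then new ++ repl old new (t.drop (old.length - 1))
    else c :: repl old new t
termination_by s => s.length
decreasing_by
  · simp only [List.length_cons, List.length_drop]
    omega
  · simp

theorem repl_nil (old new : List Char) : repl old new [] = [] := by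
  simp [repl]

theorem repl_cons (old new : List Char) (c : Char) (t : List Char) :
    repl old new (c :: t) =
      if old.isPrefixOf (c :: t) then new ++ repl old new (t.drop (old.length - 1))
      else c :: repl old new t := by
  rw [repl]

theorem pvScan_nil (table : List (List Char × Int)) : pvScan table [] = [] := by
  simp [pvScan]

theorem pvScan_cons (table : List (List Char × Int)) (c : Char) (t : List Char) :
    pvScan table (c :: t) =
      match table.find? (fun kv => kv.1.isPrefixOf (c :: t)) with
      | some kv => pvFmt kv.2 kv.1 ++ pvScan table (t.drop (kv.1.length - 1))
      | none => c :: pvScan table t := by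
  rw [pvScan]

theorem pvScan_cons_some (table : List (List Char × Int)) (c : Char) (t : List Char)
    (kv : List Char × Int)
    (h : table.find? (fun kv => kv.1.isPrefixOf (c :: t)) = some kv) :
    pvScan table (c :: t) = pvFmt kv.2 kv.1 ++ pvScan table (t.drop (kv.1.length - 1)) := by
  rw [pvScan_cons, h]

theorem pvScan_cons_none (table : List (List Char × Int)) (c : Char) (t : List Char)
    (h : table.find? (fun kv => kv.1.isPrefixOf (c :: t)) = none) :
    pvScan table (c :: t) = c :: pvScan table t := by
  rw [pvScan_cons, h]

-- PySem.Chars.replace = repl for a nonempty pattern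
theorem replace_go_eq (old new : List Char) (hne : old ≠ []) :
    ∀ (fuel : Nat) (l acc : List Char), l.length ≤ fuel →
      PySem.Chars.replace.go old new fuel l acc = acc.reverse ++ repl old new l := by
  intro fuel
  induction fuel with
  | zero =>
    intro l acc hl
    have : l = [] := List.eq_nil_of_length_eq_zero (Nat.le_zero.mp hl)
    subst this
    simp [PySem.Chars.replace.go, repl_nil]
  | succ n ih =>
    intro l acc hl
    cases l with
    | nil => simp [PySem.Chars.replace.go, repl_nil]
    | cons c t =>
      rw [PySem.Chars.replace.go]
      by_cases hp : old.isPrefixOf (c :: t)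
      · rw [if_pos hp]
        obtain ⟨o, ot, rfl⟩ : ∃ o ot, old = o :: ot := by
          cases old with
          | nil => exact absurd rfl hne
          | cons o ot => exact ⟨o, ot, rfl⟩
        have hdrop : List.drop (o :: ot).length (c :: t) = List.drop ((o :: ot).length - 1) t := by
          simp
        rw [hdrop, ih _ _ (by
          simp only [List.length_cons] at hl
          simp only [List.length_drop]
          omega)]
        rw [repl_cons, if_pos hp]
        simp
      · rw [if_neg hp, ih _ _ (by simp at hl; omega), repl_cons, if_neg hp]
        simp

theorem replace_eq_repl (s old new : List Char) (hne : old ≠ []) :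
    PySem.Chars.replace s old new = repl old new s := by
  unfold PySem.Chars.replace
  rw [if_neg (by simp [hne]), replace_go_eq old new hne s.length s [] le_rfl]
  simp

-- "old never matches starting inside x, whatever follows x": a mismatch occurs within x
def pvNoMatchIn (x old : List Char) : Prop :=
  ∀ i < x.length, ∃ j < old.length, i + j < x.length ∧ x[i+j]? ≠ old[j]?

theorem prefix_getElem? {p l : List Char} (h : p <+: l) {j : Nat} (hj : j < p.length) :
    l[j]? = p[j]? := by
  obtain ⟨r, rfl⟩ := h
  exact List.getElem?_append_left hj

theorem repl_append (old new : List Char) {x : List Char} (h : pvNoMatchIn x old)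
    (y : List Char) : repl old new (x ++ y) = x ++ repl old new y := by
  induction x with
  | nil => simp
  | cons c x' ih =>
    obtain ⟨j, hj, hjx, hne⟩ := h 0 (by simp)
    simp only [Nat.zero_add] at hjx hne
    have hnp : ¬ old.isPrefixOf (c :: (x' ++ y)) := by
      intro hp
      have hpre : old <+: c :: (x' ++ y) := List.isPrefixOf_iff_prefix.mp hp
      have h1 : (c :: (x' ++ y))[j]? = old[j]? := prefix_getElem? hpre hj
      have h2 : ((c :: x') ++ y)[j]? = (c :: x')[j]? := List.getElem?_append_left hjx
      simp only [List.cons_append] at h2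
      exact hne (h2.symm.trans h1)
    rw [List.cons_append, repl_cons, if_neg hnp]
    rw [ih (fun i hi => by
      obtain ⟨j', hj', hjx', hne'⟩ := h (i + 1) (by simp; omega)
      refine ⟨j', hj', by simp at hjx' ⊢; omega, ?_⟩
      have he : i + 1 + j' = (i + j') + 1 := by omega
      rw [he, List.getElem?_cons_succ] at hne'
      exact hne')]
    simp

-- a pattern without ESC that is a prefix of a scan output is a prefix of the input
theorem prefix_scan_prefix (table : List (List Char × Int)) :
    ∀ (n : Nat) (s : List Char), s.length ≤ n → ∀ (p : List Char), p ≠ [] →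
      '\u001b' ∉ p → p <+: pvScan table s → p <+: s := by
  intro n
  induction n with
  | zero =>
    intro s hs p hp _ hpre
    have : s = [] := List.eq_nil_of_length_eq_zero (Nat.le_zero.mp hs)
    subst this
    rw [pvScan_nil] at hpre
    exact absurd (List.prefix_nil.mp hpre) hp
  | succ n ih =>
    intro s hs p hp hesc hpre
    cases s with
    | nil =>
      rw [pvScan_nil] at hpre
      exact absurd (List.prefix_nil.mp hpre) hp
    | cons c t =>
      obtain ⟨p0, p', rfl⟩ : ∃ p0 p', p = p0 :: p' := by
        cases p with
        | nil => exact absurd rfl hp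
        | cons p0 p' => exact ⟨p0, p', rfl⟩
      cases hf : table.find? (fun kv => kv.1.isPrefixOf (c :: t)) with
      | some kv =>
        rw [pvScan_cons_some table c t kv hf] at hpre
        simp only [pvFmt, List.cons_append] at hpre
        have := (List.cons_prefix_cons.mp hpre).1
        subst this
        exact absurd (List.mem_cons_self) hesc
      | none =>
        rw [pvScan_cons_none table c t hf] at hpre
        obtain ⟨hc, hp'⟩ := List.cons_prefix_cons.mp hpre
        subst hc
        cases hp'e : p' with
        | nil => simp
        | cons q qt =>
          rw [← hp'e]
          have hpt : p' <+: t := by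
            apply ih t (by simpa using Nat.lt_succ_iff.mp (Nat.lt_of_lt_of_le (by simp) hs)) p'
              (by simp [hp'e]) (fun hm => hesc (List.mem_cons_of_mem _ hm)) hp'
          exact List.cons_prefix_cons.mpr ⟨rfl, hpt⟩

-- while no table key matches, the scan copies characters
theorem scan_skip (table : List (List Char × Int)) :
    ∀ (m : Nat) (s : List Char),
      (∀ i < m, ∀ kv ∈ table, ¬ kv.1.isPrefixOf (s.drop i) = true) →
      pvScan table s = s.take m ++ pvScan table (s.drop m) := by
  intro m
  induction m with
  | zero => intro s _; simp
  | succ n ih =>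
    intro s h
    cases s with
    | nil => simp [pvScan_nil]
    | cons c t =>
      have hf : table.find? (fun kv => kv.1.isPrefixOf (c :: t)) = none :=
        List.find?_eq_none.mpr (fun kv hkv => h 0 (Nat.succ_pos n) kv hkv)
      rw [pvScan_cons_none table c t hf]
      simp only [List.take_succ_cons, List.drop_succ_cons, List.cons_append, List.cons.injEq]
      exact ⟨by trivial, ih t (fun i hi kv hkv => h (i + 1) (by omega) kv hkv)⟩

-- the core step: one more replace pass over the scan of a smaller table
-- equals the scan of the table extended by that key
theorem step (S : List (List Char × Int)) (old : List Char) (col : Int)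
    (hne : old ≠ []) (hesc : '\u001b' ∉ old)
    (H1 : ∀ kv ∈ S, pvNoMatchIn (pvFmt kv.2 kv.1) old)
    (H2 : ∀ kv ∈ S, ∀ j < old.length, 0 < j →
            ∃ i < kv.1.length, j + i < old.length ∧ old[j+i]? ≠ kv.1[i]?) :
    ∀ (n : Nat) (s : List Char), s.length ≤ n →
      repl old (pvFmt col old) (pvScan S s) = pvScan (S ++ [(old, col)]) s := by
  intro n
  induction n with
  | zero =>
    intro s hs
    have : s = [] := List.eq_nil_of_length_eq_zero (Nat.le_zero.mp hs)
    subst this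
    rw [pvScan_nil, pvScan_nil, repl_nil]
  | succ n ih =>
    intro s hs
    cases s with
    | nil => rw [pvScan_nil, pvScan_nil, repl_nil]
    | cons c t =>
      have hlen : t.length ≤ n := by simpa using Nat.lt_succ_iff.mp (Nat.lt_of_lt_of_le (by simp) hs)
      cases hf : S.find? (fun kv => kv.1.isPrefixOf (c :: t)) with
      | some kv =>
        have hmem : kv ∈ S := List.mem_of_find?_eq_some hf
        have hf' : (S ++ [(old, col)]).find? (fun kv => kv.1.isPrefixOf (c :: t)) = some kv := by
          rw [List.find?_append, hf]; rfl
        rw [pvScan_cons_some S c t kv hf, pvScan_cons_some _ c t kv hf']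
        rw [repl_append old (pvFmt col old) (H1 kv hmem)]
        congr 1
        exact ih _ (le_trans (by simp only [List.length_drop]; omega) hlen)
      | none =>
        by_cases hp : old.isPrefixOf (c :: t)
        · -- old matches here; no S-key matches anywhere inside old's span
          have hpre : old <+: c :: t := List.isPrefixOf_iff_prefix.mp hp
          have hnomatch : ∀ i < old.length, ∀ kv ∈ S,
              ¬ kv.1.isPrefixOf ((c :: t).drop i) = true := by
            intro i hi kv hkv hmatch
            cases Nat.eq_zero_or_pos i with
            | inl h0 =>
              subst h0
              exact (List.find?_eq_none.mp hf kv hkv) (by simpa using hmatch)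
            | inr hpos =>
              obtain ⟨idx, hidx, hsum, hneq⟩ := H2 kv hkv i hi hpos
              have hkpre : kv.1 <+: (c :: t).drop i := List.isPrefixOf_iff_prefix.mp hmatch
              have h1 : ((c :: t).drop i)[idx]? = kv.1[idx]? := prefix_getElem? hkpre hidx
              have h2 : ((c :: t).drop i)[idx]? = (c :: t)[i + idx]? := List.getElem?_drop
              have h3 : (c :: t)[i + idx]? = old[i + idx]? := prefix_getElem? hpre hsum
              exact hneq ((h3.symm.trans (h2.symm.trans h1)))
          have hskip := scan_skip S old.length (c :: t) hnomatch
          obtain ⟨r, hr⟩ := hpre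
          have htake : (c :: t).take old.length = old := by rw [← hr]; exact List.take_left
          have hdropr : (c :: t).drop old.length = r := by rw [← hr]; exact List.drop_left
          -- left side
          rw [hskip, htake, hdropr]
          obtain ⟨o, ot, rfl⟩ : ∃ o ot, old = o :: ot := by
            cases old with
            | nil => exact absurd rfl hne
            | cons o ot => exact ⟨o, ot, rfl⟩
          rw [List.cons_append, repl_cons,
            if_pos (List.isPrefixOf_iff_prefix.mpr (by
              rw [← List.cons_append]; exact List.prefix_append _ _))]
          have hdrop2 : List.drop ((o :: ot).length - 1) (ot ++ pvScan S r) = pvScan S r := by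
            simp only [List.length_cons, Nat.add_sub_cancel]
            exact List.drop_left
          rw [hdrop2]
          -- right side: the appended key is found
          have hfind : (S ++ [((o :: ot), col)]).find?
              (fun kv => kv.1.isPrefixOf (c :: t)) = some ((o :: ot), col) := by
            rw [List.find?_append, hf]
            simp [hp]
          rw [pvScan_cons_some _ c t _ hfind]
          have hrlen : r.length ≤ n := by
            have : (c :: t).length = (o :: ot).length + r.length := by rw [← hr]; simp; omega
            simp at hs this
            omega
          rw [ih r hrlen]
          congr 1
          have : List.drop ((o :: ot).length - 1) t = (c :: t).drop (o :: ot).length := by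
            simp
          rw [this, hdropr]
        · -- no key at this position at all
          have hscan : pvScan S (c :: t) = c :: pvScan S t := pvScan_cons_none S c t hf
          have hnp : ¬ old.isPrefixOf (c :: pvScan S t) := by
            intro habs
            have : old <+: pvScan S (c :: t) := by
              rw [hscan]; exact List.isPrefixOf_iff_prefix.mp habs
            have := prefix_scan_prefix S (c :: t).length (c :: t) le_rfl old hne hesc this
            exact hp (List.isPrefixOf_iff_prefix.mpr this)
          have hfind : (S ++ [(old, col)]).find?
              (fun kv => kv.1.isPrefixOf (c :: t)) = none := by
            rw [List.find?_append, hf]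
            simp [hp]
          rw [hscan, pvScan_cons_none _ c t hfind, repl_cons, if_neg hnp, ih t hlen]

theorem pvScan_empty_table (s : List Char) : pvScan [] s = s := by
  induction s with
  | nil => exact pvScan_nil []
  | cons c t ih => rw [pvScan_cons]; simp [ih]

-- ===== VERDICT (by name: the statement is the Claim_ definition above) =====
theorem chain_step (S : List (List Char × Int)) (old : List Char) (col : Int)
    (new : List Char) (hnew : new = pvFmt col old)
    (hne : old ≠ []) (hesc : '\u001b' ∉ old)
    (H1 : ∀ kv ∈ S, pvNoMatchIn (pvFmt kv.2 kv.1) old)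
    (H2 : ∀ kv ∈ S, ∀ j < old.length, 0 < j →
            ∃ i < kv.1.length, j + i < old.length ∧ old[j+i]? ≠ kv.1[i]?)
    (l : List Char) :
    PySem.Chars.replace (pvScan S l) old new = pvScan (S ++ [(old, col)]) l := by
  rw [replace_eq_repl _ _ _ hne, hnew]
  exact step S old col hne hesc H1 H2 l.length l le_rfl

set_option maxHeartbeats 2000000 in
theorem convert_to_ansi_spec : Claim_equal_convert_to_ansi := by
  intro message _
  unfold Spec_convert_to_ansi convert_to_ansi convert_to_ansi_alt
  simp only [List.foldl_cons, List.foldl_nil, PySem.Str.replace, String.toList_ofList,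
    String.toList_append, PySem.Int.toList_toStr]
  refine congrArg String.ofList ?_
  conv_lhs => rw [← pvScan_empty_table ("```ansi\n".toList ++ message.toList ++ "\n```".toList)]
  rw [chain_step [] "CRITICAL".toList 31 ("\x1b[1;".toList ++ PySem.Int.toChars 31 ++ "m".toList ++ "CRITICAL".toList ++ "\x1b[0;0m".toList) (by decide) (by decide) (by decide) (by unfold pvNoMatchIn; decide) (by decide)]
  simp only [List.nil_append]
  rw [chain_step [("CRITICAL".toList, 31)] "ERROR".toList 31 ("\x1b[1;".toList ++ PySem.Int.toChars 31 ++ "m".toList ++ "ERROR".toList ++ "\x1b[0;0m".toList) (by decide) (by decide) (by decide) (by unfold pvNoMatchIn; decide) (by decide)]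
  simp only [List.nil_append, List.cons_append]
  rw [chain_step [("CRITICAL".toList, 31), ("ERROR".toList, 31)] "WARNING".toList 33 ("\x1b[1;".toList ++ PySem.Int.toChars 33 ++ "m".toList ++ "WARNING".toList ++ "\x1b[0;0m".toList) (by decide) (by decide) (by decide) (by unfold pvNoMatchIn; decide) (by decide)]
  simp only [List.nil_append, List.cons_append]
  rw [chain_step [("CRITICAL".toList, 31), ("ERROR".toList, 31), ("WARNING".toList, 33)] "INFO".toList 34 ("\x1b[1;".toList ++ PySem.Int.toChars 34 ++ "m".toList ++ "INFO".toList ++ "\x1b[0;0m".toList) (by decide) (by decide) (by decide) (by unfold pvNoMatchIn; decide) (by decide)]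
  simp only [List.nil_append, List.cons_append]
  rw [chain_step [("CRITICAL".toList, 31), ("ERROR".toList, 31), ("WARNING".toList, 33), ("INFO".toList, 34)] "DEBUG".toList 37 ("\x1b[1;".toList ++ PySem.Int.toChars 37 ++ "m".toList ++ "DEBUG".toList ++ "\x1b[0;0m".toList) (by decide) (by decide) (by decide) (by unfold pvNoMatchIn; decide) (by decide)]
  simp only [List.nil_append, List.cons_append]
  rw [chain_step [("CRITICAL".toList, 31), ("ERROR".toList, 31), ("WARNING".toList, 33), ("INFO".toList, 34), ("DEBUG".toList, 37)] "dgg-services-manager".toList 31 ("\x1b[1;".toList ++ PySem.Int.toChars 31 ++ "m".toList ++ "dgg-services-manager".toList ++ "\x1b[0;0m".toList) (by decide) (by decide) (by decide) (by unfold pvNoMatchIn; decide) (by decide)]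
  simp only [List.nil_append, List.cons_append]
  rw [chain_step [("CRITICAL".toList, 31), ("ERROR".toList, 31), ("WARNING".toList, 33), ("INFO".toList, 34), ("DEBUG".toList, 37), ("dgg-services-manager".toList, 31)] "dgg-relay".toList 33 ("\x1b[1;".toList ++ PySem.Int.toChars 33 ++ "m".toList ++ "dgg-relay".toList ++ "\x1b[0;0m".toList) (by decide) (by decide) (by decide) (by unfold pvNoMatchIn; decide) (by decide)]
  simp only [List.nil_append, List.cons_append]
  rw [chain_step [("CRITICAL".toList, 31), ("ERROR".toList, 31), ("WARNING".toList, 33), ("INFO".toList, 34), ("DEBUG".toList, 37), ("dgg-services-manager".toList, 31), ("dgg-relay".toList, 33)] "dggpt".toList 34 ("\x1b[1;".toList ++ PySem.Int.toChars 34 ++ "m".toList ++ "dggpt".toList ++ "\x1b[0;0m".toList) (by decide) (by decide) (by decide) (by unfold pvNoMatchIn; decide) (by decide)]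
  simp only [List.nil_append, List.cons_append]
  rw [chain_step [("CRITICAL".toList, 31), ("ERROR".toList, 31), ("WARNING".toList, 33), ("INFO".toList, 34), ("DEBUG".toList, 37), ("dgg-services-manager".toList, 31), ("dgg-relay".toList, 33), ("dggpt".toList, 34)] "dgg-emotes-bot".toList 35 ("\x1b[1;".toList ++ PySem.Int.toChars 35 ++ "m".toList ++ "dgg-emotes-bot".toList ++ "\x1b[0;0m".toList) (by decide) (by decide) (by decide) (by unfold pvNoMatchIn; decide) (by decide)]
  simp only [List.nil_append, List.cons_append]
  rw [chain_step [("CRITICAL".toList, 31), ("ERROR".toList, 31), ("WARNING".toList, 33), ("INFO".toList, 34), ("DEBUG".toList, 37), ("dgg-services-manager".toList, 31), ("dgg-relay".toList, 33), ("dggpt".toList, 34), ("dgg-emotes-bot".toList, 35)] "dgg-logger".toList 36 ("\x1b[1;".toList ++ PySem.Int.toChars 36 ++ "m".toList ++ "dgg-logger".toList ++ "\x1b[0;0m".toList) (by decide) (by decide) (by decide) (by unfold pvNoMatchIn; decide) (by decide)]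
  simp only [List.nil_append, List.cons_append]
  rw [pvColors]
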